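-- pv_equiv track=rewrite | github.com/AceTep/kol1 | not_a_cheep_string.py | process_case
-- ===== SOURCE A (Python) =====
-- def process_case(w, p):
--     price = [ord(char) - ord('a') + 1 for char in w]
--
--     total_price = sum(price)
--
--     if total_price <= p:
--         return w
--
--     char_price_pairs = [(price[i], w[i]) for i in range(len(w))]
--
--     char_price_pairs.sort(reverse=True, key=lambda x: x[0])
--
--     remaining_price = total_price
--     result = list(w)
--     for i in range(len(char_price_pairs)):
--         if remaining_price - char_price_pairs[i][0] >= p:
--             remaining_price -= char_price_pairs[i][0]
--             result[result.index(char_price_pairs[i][1])] = ''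
--
--     return ''.join(result)
-- ===== SOURCE B (Python) =====
-- def process_case(w, p):
--     total = sum(ord(c) - ord('a') + 1 for c in w)
--     if total <= p:
--         return w
--     counts = {}
--     for c in w:
--         counts[c] = counts.get(c, 0) + 1
--     remove = {}
--     remaining = total
--     for c in sorted(counts, reverse=True):
--         price = ord(c) - ord('a') + 1
--         k = counts[c]
--         if price <= 0:
--             m = k
--         else:
--             m = min(k, (remaining - p) // price)
--         remaining -= m * price
--         if m != 0:
--             remove[c] = m
--     out = []
--     for c in w:
--         r = remove.get(c, 0)
--         if r != 0:
--             remove[c] = r - 1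
--         else:
--             out.append(c)
--     return ''.join(out)
-- ===== Notes on version B (the rewrite author's own statement) =====
-- stated objective: faster
-- what changed: Replaces the sort of all n characters plus the quadratic loop of repeated list.index scans and one-by-one removals with a per-character counter: the at most 100 distinct characters are processed in descending price order, the number of removals per character is computed in one division, and the output is built in a single filtering pass over the string.
import Mathlib
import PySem

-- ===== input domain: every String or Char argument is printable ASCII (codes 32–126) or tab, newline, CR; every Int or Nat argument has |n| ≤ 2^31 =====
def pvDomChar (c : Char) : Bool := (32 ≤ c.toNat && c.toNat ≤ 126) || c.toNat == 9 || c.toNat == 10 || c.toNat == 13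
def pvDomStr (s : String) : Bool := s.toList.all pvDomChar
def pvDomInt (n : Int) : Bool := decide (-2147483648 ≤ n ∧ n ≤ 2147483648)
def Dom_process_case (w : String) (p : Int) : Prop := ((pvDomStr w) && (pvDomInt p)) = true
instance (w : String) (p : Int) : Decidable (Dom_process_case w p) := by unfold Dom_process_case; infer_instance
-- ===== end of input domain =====

-- B replaces A's full sort of all characters and its quadratic loop of repeated `result.index`
-- scans with a per-character counter, one division per distinct character and a single filtering
-- pass; equal return value on every input (neither mutates its arguments).

-- ===== PORT A =====
-- A-side helper: the body of A's for-loop (a `result` entry `some c` is the one-char string, `none` is '').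
def pvAStep (p : Int) (st : Int × List (Option Char)) (pr : Int × Char) : Int × List (Option Char) :=
  if p ≤ st.1 - pr.1 then
    (st.1 - pr.1,
     match PySem.List.index? st.2 (some pr.2) with
     | some j => st.2.set j none
     | none => st.2)
  else st

def process_case (w : String) (p : Int) : String :=
  let chars := w.toList
  let price := chars.map (fun char => (char.toNat : Int) - ('a'.toNat : Int) + 1)
  let total_price := price.sum
  if total_price ≤ p then w
  else
    let char_price_pairs := (PySem.List.pyRange 0 (chars.length : Int) 1).map
      (fun i => (PySem.List.pyGetD price i 0, PySem.List.pyGetD chars i ' '))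
    let spairs := PySem.List.sorted char_price_pairs (fun x => x.1) true
    let st := (PySem.List.pyRange 0 (spairs.length : Int) 1).foldl
      (fun st i => pvAStep p st (PySem.List.pyGetD spairs i (0, ' ')))
      (total_price, chars.map some)
    String.ofList (st.2.filterMap id)


-- ===== PORT B =====
-- B-side helpers: the bodies of B's two loops.
def pvBRemoveStep (counts : PySem.Dict Char Int) (p : Int)
    (st : PySem.Dict Char Int × Int) (c : Char) : PySem.Dict Char Int × Int :=
  let q := (c.toNat : Int) - ('a'.toNat : Int) + 1
  let k := counts.getD c 0
  let m := if q ≤ 0 then k else min k (PySem.Int.floordiv (st.2 - p) q)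
  ((if m ≠ 0 then st.1.insert c m else st.1), st.2 - m * q)

def pvBOutStep (st : List Char × PySem.Dict Char Int) (c : Char) : List Char × PySem.Dict Char Int :=
  let r := st.2.getD c 0
  if r ≠ 0 then (st.1, st.2.insert c (r - 1)) else (st.1 ++ [c], st.2)


def process_case_alt (w : String) (p : Int) : String :=
  let total := (w.toList.map (fun c => (c.toNat : Int) - ('a'.toNat : Int) + 1)).sum
  if total ≤ p then w
  else
    let counts : PySem.Dict Char Int :=
      w.toList.foldl (fun d c => d.insert c (d.getD c 0 + 1)) PySem.Dict.empty
    let skeys := PySem.List.sorted counts.keys (fun x => x) true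
    let st := skeys.foldl (pvBRemoveStep counts p) (PySem.Dict.empty, total)
    let out := w.toList.foldl pvBOutStep ([], st.1)
    String.ofList out.1


-- ===== PRECONDITION & SPEC =====
def Spec_process_case (w : String) (p : Int) (out : String) : Prop := out = process_case_alt w p
instance (w : String) (p : Int) (out : String) : Decidable (Spec_process_case w p out) := by unfold Spec_process_case; infer_instance

-- ===== CLAIM (what is proved, stated in full; the proofs are below) =====
def Claim_equal_process_case : Prop := ∀ (w : String) (p : Int), Dom_process_case w p → Spec_process_case w p (process_case w p)

-- ===== LEMMAS AND PROOFS =====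

def pvPrice (c : Char) : Int := (c.toNat : Int) - ('a'.toNat : Int) + 1

def pvK (l : List Char) : List Char :=
  PySem.List.sorted (PySem.Set.ofList l) (fun x => x) true

def pvMsk : List Char → (Char → Int) → List (Option Char)
  | [], _ => []
  | c :: t, f =>
    if f c ≠ 0 then none :: pvMsk t (Function.update f c (f c - 1))
    else some c :: pvMsk t f

def pvGph : List Char → (Char → Int) → List Char
  | [], _ => []
  | c :: t, f =>
    if f c ≠ 0 then pvGph t (Function.update f c (f c - 1))
    else c :: pvGph t f

def pvM (p r q k : Int) : Int := if q ≤ 0 then k else min k (PySem.Int.floordiv (r - p) q)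

def pvSpecStep (l : List Char) (p : Int) (st : (Char → Int) × Int) (c : Char) : (Char → Int) × Int :=
  let q := pvPrice c
  let m := pvM p st.2 q (l.count c)
  (Function.update st.1 c m, st.2 - m * q)


theorem pvPrice_mono {c d : Char} (h : c ≤ d) : pvPrice c ≤ pvPrice d := by
  unfold pvPrice
  have h' : c.toNat ≤ d.toNat := Fin.mk_le_mk.mp h
  omega

theorem pvPrice_inj {c d : Char} (h : pvPrice c = pvPrice d) : c = d := by
  unfold pvPrice at h
  have h' : c.toNat = d.toNat := by omega
  exact le_antisymm (Fin.mk_le_mk.mpr (le_of_eq h')) (Fin.mk_le_mk.mpr (le_of_eq h'.symm))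

theorem pv_perm : ∀ (K : List Char) (l : List Char), K.Nodup → (∀ d ∈ l, d ∈ K) →
    (K.flatMap fun c => List.replicate (l.count c) c).Perm l := by
  intro K
  induction K with
  | nil =>
    intro l _ hmem
    have : l = [] := List.eq_nil_iff_forall_not_mem.mpr (fun a ha => by simpa using hmem a ha)
    simp [this]
  | cons c K' ih =>
    intro l hnd hmem
    rw [List.flatMap_cons]
    have hnd' : K'.Nodup := (List.nodup_cons.mp hnd).2
    have hcK : c ∉ K' := (List.nodup_cons.mp hnd).1
    set l' := l.filter (fun d => !(d == c)) with hl'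
    have hmem' : ∀ d ∈ l', d ∈ K' := by
      intro d hd
      rw [hl', List.mem_filter] at hd
      have h1 := hmem d hd.1
      have h2 : d ≠ c := by simpa using hd.2
      rcases List.mem_cons.mp h1 with h | h
      · exact absurd h h2
      · exact h
    have hcnt : ∀ d ∈ K', l'.count d = l.count d := by
      intro d hd
      have hdc : d ≠ c := fun h => hcK (h ▸ hd)
      rw [hl']
      exact List.count_filter (by simp [hdc])
    have hrw : (K'.flatMap fun d => List.replicate (l.count d) d)
        = (K'.flatMap fun d => List.replicate (l'.count d) d) := by
      rw [List.flatMap_def, List.flatMap_def]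
      congr 1
      exact List.map_congr_left (fun d hd => by rw [hcnt d hd])
    rw [hrw]
    have p1 : (List.replicate (l.count c) c ++ (K'.flatMap fun d => List.replicate (l'.count d) d)).Perm
        (List.replicate (l.count c) c ++ l') := (ih l' hnd' hmem').append_left _
    have p2 : List.replicate (l.count c) c = l.filter (fun x => x == c) := (List.filter_beq c).symm
    have p3 := List.filter_append_perm (fun x => x == c) l
    exact p1.trans (by rw [p2]; exact p3)

theorem pv_blocks_eq_sorted (l : List Char) :
    PySem.List.sorted (l.map (fun c => (pvPrice c, c))) (fun x => x.1) true
    = (pvK l).flatMap (fun c => List.replicate (l.count c) (pvPrice c, c)) := by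
  have hKnd : (pvK l).Nodup :=
    (PySem.List.sorted_perm (PySem.Set.ofList l) (fun x => x) true).nodup_iff.mpr
      (PySem.Set.nodup_ofList l)
  have hKmem : ∀ d ∈ l, d ∈ pvK l := by
    intro d hd
    rw [pvK, PySem.List.mem_sorted, PySem.Set.mem_ofList]
    exact hd
  have hcand : ((pvK l).flatMap fun c => List.replicate (l.count c) (pvPrice c, c))
      = ((pvK l).flatMap fun c => List.replicate (l.count c) c).map (fun c => (pvPrice c, c)) := by
    rw [List.map_flatMap]
    simp [List.map_replicate]
  have hcperm : ((pvK l).flatMap fun c => List.replicate (l.count c) (pvPrice c, c)).Perm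
      (l.map (fun c => (pvPrice c, c))) := by
    rw [hcand]
    exact (pv_perm (pvK l) l hKnd hKmem).map _
  -- shape of members
  have hshape : ∀ x ∈ l.map (fun c => (pvPrice c, c)), x.1 = pvPrice x.2 := by
    intro x hx
    obtain ⟨c, _, rfl⟩ := List.mem_map.mp hx
    rfl
  apply List.Perm.eq_of_pairwise (le := fun a b => b.1 ≤ a.1)
  · intro a b ha hb hab hba
    have ha' : a ∈ l.map (fun c => (pvPrice c, c)) := by
      rw [PySem.List.mem_sorted] at ha; exact ha
    have hb' : b ∈ l.map (fun c => (pvPrice c, c)) := hcperm.mem_iff.mp hb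
    have h1 := hshape a ha'
    have h2 := hshape b hb'
    have : pvPrice a.2 = pvPrice b.2 := by rw [← h1, ← h2]; omega
    have h3 := pvPrice_inj this
    obtain ⟨a1, a2⟩ := a; obtain ⟨b1, b2⟩ := b
    simp only at h1 h2 h3
    subst h3; rw [h1, h2]
  · exact PySem.List.sorted_pairwise_rev _ _
  · rw [List.flatMap_def, List.pairwise_flatten]
    constructor
    · intro bl hbl
      obtain ⟨c, _, rfl⟩ := List.mem_map.mp hbl
      exact List.pairwise_replicate.mpr (Or.inr le_rfl)
    · have hKp : (pvK l).Pairwise (fun a b => b ≤ a) :=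
        PySem.List.sorted_pairwise_rev (PySem.Set.ofList l) (fun x => x)
      rw [List.pairwise_map]
      refine hKp.imp_of_mem ?_
      intro c d hc hd h
      intro x hx y hy
      rw [List.eq_of_mem_replicate hx, List.eq_of_mem_replicate hy]
      exact pvPrice_mono h
  · exact (PySem.List.sorted_perm _ _ _).trans hcperm.symm

theorem pvMsk_zero (l : List Char) : pvMsk l (fun _ => 0) = l.map some := by
  induction l with
  | nil => rfl
  | cons c t ih => simp [pvMsk, ih]

theorem pvMsk_filterMap (l : List Char) (f : Char → Int) :
    (pvMsk l f).filterMap id = pvGph l f := by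
  induction l generalizing f with
  | nil => rfl
  | cons c t ih =>
    by_cases h : f c = 0
    · rw [pvMsk, if_neg (by simp [h]), pvGph, if_neg (by simp [h])]
      simpa using ih f
    · rw [pvMsk, if_pos h, pvGph, if_pos h]
      simpa using ih (Function.update f c (f c - 1))

theorem pv_mask_remove (l : List Char) : ∀ (f : Char → Int) (c : Char),
    0 ≤ f c → f c < (l.count c : Int) →
    ∃ j, PySem.List.index? (pvMsk l f) (some c) = some j ∧
      (pvMsk l f).set j none = pvMsk l (Function.update f c (f c + 1)) := by
  induction l with
  | nil => intro f c h1 h2; simp [List.count_nil] at h2; omega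
  | cons a t ih =>
    intro f c h1 h2
    by_cases hac : a = c
    · subst hac
      by_cases hz : f a = 0
      · refine ⟨0, ?_, ?_⟩
        · rw [pvMsk, if_neg (by simp [hz])]
          exact PySem.List.index?_cons_self _ _
        · rw [pvMsk, if_neg (by simp [hz])]
          rw [pvMsk, if_pos (by simp [Function.update_self]; omega)]
          simp only [List.set_cons_zero]
          congr 1
          simp only [Function.update_self, Function.update_idem]
          rw [show f a + 1 - 1 = f a by ring, Function.update_eq_self]
      · have h2' : f a - 1 < (t.count a : Int) := by
          rw [List.count_cons_self] at h2; push_cast at h2 ⊢; omega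
        obtain ⟨j, hj1, hj2⟩ := ih (Function.update f a (f a - 1)) a
          (by simp only [Function.update_self]; omega)
          (by simpa only [Function.update_self] using h2')
        have hne : (none : Option Char) ≠ some a := by simp
        refine ⟨j + 1, ?_, ?_⟩
        · rw [pvMsk, if_pos hz, PySem.List.index?_cons_of_ne _ hne, hj1]; rfl
        · rw [pvMsk, if_pos hz, List.set_cons_succ, hj2]
          rw [pvMsk, if_pos (by simp only [Function.update_self]; omega)]
          congr 1
          simp only [Function.update_self, Function.update_idem]
          have he : f a - 1 + 1 = f a + 1 - 1 := by ring
          rw [he]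
    · have hca : c ≠ a := fun h => hac h.symm
      have h2' : f c < (t.count c : Int) := by
        rwa [List.count_cons_of_ne hac] at h2
      by_cases hz : f a = 0
      · obtain ⟨j, hj1, hj2⟩ := ih f c h1 h2'
        have hne : some a ≠ some c := by simpa using hac
        refine ⟨j + 1, ?_, ?_⟩
        · rw [pvMsk, if_neg (by simp [hz]), PySem.List.index?_cons_of_ne _ hne, hj1]; rfl
        · rw [pvMsk, if_neg (by simp [hz]), List.set_cons_succ, hj2]
          rw [pvMsk, if_neg (by simp [Function.update_of_ne hac, hz])]
      · obtain ⟨j, hj1, hj2⟩ := ih (Function.update f a (f a - 1)) c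
          (by rwa [Function.update_of_ne hca]) (by rwa [Function.update_of_ne hca])
        have hne : (none : Option Char) ≠ some c := by simp
        refine ⟨j + 1, ?_, ?_⟩
        · rw [pvMsk, if_pos hz, PySem.List.index?_cons_of_ne _ hne, hj1]; rfl
        · rw [pvMsk, if_pos hz, List.set_cons_succ, hj2]
          rw [pvMsk, if_pos (by simp [Function.update_of_ne hac, hz])]
          congr 1
          rw [Function.update_of_ne hca, Function.update_of_ne hac]
          rw [Function.update_comm hca]

theorem pvM_le (p r q k : Int) : pvM p r q k ≤ k := by
  unfold pvM; split_ifs with h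
  · exact le_rfl
  · exact min_le_left _ _

theorem pvM_nonneg (p r q k : Int) (hr : p ≤ r) (hk : 0 ≤ k) : 0 ≤ pvM p r q k := by
  unfold pvM; split_ifs with h
  · exact hk
  · have h' : 0 < q := by omega
    rw [PySem.Int.floordiv_eq_ediv_of_pos h']
    exact le_min hk (Int.ediv_nonneg (by omega) (by omega))

theorem pvM_budget (p r q k : Int) (hr : p ≤ r) (hk : 0 ≤ k) : p ≤ r - pvM p r q k * q := by
  unfold pvM; split_ifs with h
  · nlinarith
  · have h' : 0 < q := by omega
    rw [PySem.Int.floordiv_eq_ediv_of_pos h']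
    have h1 : min k ((r - p) / q) ≤ (r - p) / q := min_le_right _ _
    have h2 : min k ((r - p) / q) * q ≤ r - p := (Int.le_ediv_iff_mul_le h').mp h1
    omega

theorem pvM_succ_fire (p r q : Int) (n : Nat) (hfire : p ≤ r - q) :
    pvM p r q ((n : Int) + 1) = pvM p (r - q) q (n : Int) + 1 := by
  unfold pvM; split_ifs with h
  · rfl
  · have h' : 0 < q := by omega
    rw [PySem.Int.floordiv_eq_ediv_of_pos h', PySem.Int.floordiv_eq_ediv_of_pos h']
    have hx : (r - q - p) / q = (r - p) / q - 1 := by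
      have : r - q - p = (r - p) + (-1) * q := by ring
      rw [this, Int.add_mul_ediv_right _ _ (by omega)]
      ring
    have h1 : (1 : Int) ≤ (r - p) / q := (Int.le_ediv_iff_mul_le h').mpr (by omega)
    rw [hx]
    omega

theorem pvM_nofire (p r q k : Int) (hr : p ≤ r) (hk : 0 ≤ k) (hnof : ¬ p ≤ r - q) :
    pvM p r q k = 0 := by
  unfold pvM; split_ifs with h
  · omega
  · have h' : 0 < q := by omega
    rw [PySem.Int.floordiv_eq_ediv_of_pos h']
    have : (r - p) / q = 0 := Int.ediv_eq_zero_of_lt (by omega) (by omega)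
    rw [this]
    omega

theorem pv_block (l : List Char) (p : Int) (c : Char) :
    ∀ (n : Nat) (r : Int) (f : Char → Int), p ≤ r → 0 ≤ f c → (f c).toNat + n ≤ l.count c →
    (List.replicate n (pvPrice c, c)).foldl (pvAStep p) (r, pvMsk l f)
      = (r - pvM p r (pvPrice c) (n : Int) * pvPrice c,
         pvMsk l (Function.update f c (f c + pvM p r (pvPrice c) (n : Int)))) := by
  intro n
  induction n with
  | zero =>
    intro r f hr hf hcnt
    have h0 : pvM p r (pvPrice c) 0 = 0 :=
      le_antisymm (pvM_le _ _ _ _) (pvM_nonneg _ _ _ _ hr le_rfl)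
    simp only [Nat.cast_zero, h0, zero_mul, sub_zero, add_zero, Function.update_eq_self,
      List.replicate_zero, List.foldl_nil]
  | succ n ih =>
    intro r f hr hf hcnt
    rw [List.replicate_succ, List.foldl_cons]
    by_cases hfire : p ≤ r - pvPrice c
    · have hcnt' : f c < (l.count c : Int) := by
        have := hcnt; push_cast; omega
      obtain ⟨j, hj1, hj2⟩ := pv_mask_remove l f c hf hcnt'
      have hstep : pvAStep p (r, pvMsk l f) (pvPrice c, c)
          = (r - pvPrice c, pvMsk l (Function.update f c (f c + 1))) := by
        rw [pvAStep]
        simp only [if_pos hfire, hj1, hj2]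
      rw [hstep]
      have hrec := ih (r - pvPrice c) (Function.update f c (f c + 1)) hfire
        (by simp only [Function.update_self]; omega)
        (by simp only [Function.update_self]; omega)
      rw [hrec]
      have hM := pvM_succ_fire p r (pvPrice c) n hfire
      push_cast
      rw [hM]
      simp only [Function.update_self, Function.update_idem, Prod.mk.injEq]
      refine ⟨by ring, ?_⟩
      congr 1
      congr 1
      ring
    · have hstep : pvAStep p (r, pvMsk l f) (pvPrice c, c) = (r, pvMsk l f) := by
        rw [pvAStep]
        simp only [if_neg hfire]
      rw [hstep]
      have hrec := ih r f hr hf (by omega)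
      rw [hrec]
      have h1 := pvM_nofire p r (pvPrice c) ((n : Int) + 1) hr (by omega) hfire
      have h2 := pvM_nofire p r (pvPrice c) (n : Int) hr (by omega) hfire
      push_cast
      rw [h1, h2]

theorem pv_pairs_eq (l : List Char) :
    (PySem.List.pyRange 0 (l.length : Int) 1).map
      (fun i => (PySem.List.pyGetD (l.map (fun char => (char.toNat : Int) - ('a'.toNat : Int) + 1)) i 0,
                 PySem.List.pyGetD l i ' '))
    = l.map (fun c => (pvPrice c, c)) := by
  apply List.ext_getElem
  · simp [PySem.List.length_pyRange_one]
  · intro k h1 h2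
    simp only [PySem.List.length_pyRange_one, List.length_map] at h1
    have hk : k < l.length := by omega
    simp only [PySem.List.getElem_pyRange_one, List.getElem_map, zero_add]
    rw [PySem.List.pyGetD_natCast, PySem.List.pyGetD_natCast]
    simp [List.getD_eq_getElem?_getD, hk, pvPrice]

theorem pvK_nodup (l : List Char) : (pvK l).Nodup :=
  (PySem.List.sorted_perm (PySem.Set.ofList l) (fun x => x) true).nodup_iff.mpr
    (PySem.Set.nodup_ofList l)

-- ===== new material =====

theorem pv_foldA (l : List Char) (p : Int) :
    ∀ (K : List Char) (g : Char → Int) (r : Int), K.Nodup → p ≤ r → (∀ c ∈ K, g c = 0) →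
    (K.flatMap fun c => List.replicate (l.count c) (pvPrice c, c)).foldl (pvAStep p) (r, pvMsk l g)
      = ((K.foldl (pvSpecStep l p) (g, r)).2, pvMsk l ((K.foldl (pvSpecStep l p) (g, r)).1)) := by
  intro K
  induction K with
  | nil => intro g r _ _ _; simp
  | cons c K' ih =>
    intro g r hnd hr hg
    rw [List.flatMap_cons, List.foldl_append, List.foldl_cons]
    have hgc : g c = 0 := hg c List.mem_cons_self
    have hb := pv_block l p c (l.count c) r g hr (by rw [hgc]) (by rw [hgc]; simp)
    rw [hb]
    have hstep : pvSpecStep l p (g, r) c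
        = (Function.update g c (g c + pvM p r (pvPrice c) ((l.count c : Nat) : Int)),
           r - pvM p r (pvPrice c) ((l.count c : Nat) : Int) * pvPrice c) := by
      simp only [pvSpecStep, hgc, zero_add]
    rw [hstep]
    exact ih _ _ (List.nodup_cons.mp hnd).2
      (pvM_budget p r (pvPrice c) _ hr (Int.natCast_nonneg _))
      (fun d hd => by
        have hdc : d ≠ c := fun h => (List.nodup_cons.mp hnd).1 (h ▸ hd)
        rw [Function.update_of_ne hdc]
        exact hg d (List.mem_cons_of_mem _ hd))

theorem pv_foldB (l : List Char) (p : Int) :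
    ∀ (K : List Char) (d : PySem.Dict Char Int) (g : Char → Int) (r : Int),
      K.Nodup → (∀ c, d.getD c 0 = g c) → (∀ c ∈ K, g c = 0) →
      (∀ c, (K.foldl (pvBRemoveStep (PySem.Dict.counter l) p) (d, r)).1.getD c 0
          = (K.foldl (pvSpecStep l p) (g, r)).1 c)
      ∧ (K.foldl (pvBRemoveStep (PySem.Dict.counter l) p) (d, r)).2
          = (K.foldl (pvSpecStep l p) (g, r)).2 := by
  intro K
  induction K with
  | nil => intro d g r _ hd _; exact ⟨hd, rfl⟩
  | cons c K' ih =>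
    intro d g r hnd hd hg
    rw [List.foldl_cons, List.foldl_cons]
    have hgc : g c = 0 := hg c List.mem_cons_self
    have hkc : (PySem.Dict.counter l).getD c 0 = ((l.count c : Nat) : Int) :=
      PySem.Dict.getD_counter l c
    have hbstep : pvBRemoveStep (PySem.Dict.counter l) p (d, r) c
        = ((if pvM p r (pvPrice c) ((l.count c : Nat) : Int) ≠ 0
            then d.insert c (pvM p r (pvPrice c) ((l.count c : Nat) : Int)) else d),
           r - pvM p r (pvPrice c) ((l.count c : Nat) : Int) * pvPrice c) := by
      simp only [pvBRemoveStep, hkc, pvM, pvPrice]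
    have hsstep : pvSpecStep l p (g, r) c
        = (Function.update g c (pvM p r (pvPrice c) ((l.count c : Nat) : Int)),
           r - pvM p r (pvPrice c) ((l.count c : Nat) : Int) * pvPrice c) := by
      simp only [pvSpecStep]
    rw [hbstep, hsstep]
    apply ih
    · exact (List.nodup_cons.mp hnd).2
    · intro x
      by_cases hm : pvM p r (pvPrice c) ((l.count c : Nat) : Int) ≠ 0
      · rw [if_pos hm, PySem.Dict.getD_insert]
        by_cases hx : x = c
        · subst hx; rw [Function.update_self, if_pos rfl]
        · rw [if_neg hx, Function.update_of_ne hx]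
          exact hd x
      · rw [if_neg hm]
        have hm : pvM p r (pvPrice c) ((l.count c : Nat) : Int) = 0 := not_not.mp hm
        by_cases hx : x = c
        · subst hx; rw [Function.update_self, hd x, hgc, hm]
        · rw [Function.update_of_ne hx]; exact hd x
    · intro x hx
      have hxc : x ≠ c := fun h => (List.nodup_cons.mp hnd).1 (h ▸ hx)
      rw [Function.update_of_ne hxc]
      exact hg x (List.mem_cons_of_mem _ hx)

theorem pv_outB : ∀ (l : List Char) (acc : List Char) (d : PySem.Dict Char Int) (f : Char → Int),
    (∀ c, d.getD c 0 = f c) →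
    (l.foldl pvBOutStep (acc, d)).1 = acc ++ pvGph l f := by
  intro l
  induction l with
  | nil => intro acc d f _; simp [pvGph]
  | cons c t ih =>
    intro acc d f hd
    rw [List.foldl_cons]
    by_cases hz : f c = 0
    · have hstep : pvBOutStep (acc, d) c = (acc ++ [c], d) := by
        simp only [pvBOutStep, hd c, hz]
        simp
      rw [hstep, pvGph, if_neg (by simp [hz]), ih (acc ++ [c]) d f hd]
      simp
    · have hstep : pvBOutStep (acc, d) c = (acc, d.insert c (f c - 1)) := by
        simp only [pvBOutStep, hd c]
        rw [if_pos hz]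
      rw [hstep, pvGph, if_pos hz]
      apply ih
      intro x
      rw [PySem.Dict.getD_insert]
      by_cases hx : x = c
      · subst hx; rw [Function.update_self, if_pos rfl]
      · rw [if_neg hx, Function.update_of_ne hx]; exact hd x

theorem pv_main (w : String) (p : Int) : process_case w p = process_case_alt w p := by
  simp only [process_case, process_case_alt]
  set l := w.toList with hl
  split_ifs with htot
  · rfl
  · have hle : p ≤ (l.map (fun char => (char.toNat : Int) - ('a'.toNat : Int) + 1)).sum := by
      omega
    rw [PySem.List.foldl_pyRange_zero_pyGetD']
    rw [pv_pairs_eq, pv_blocks_eq_sorted]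
    rw [← pvMsk_zero]
    have hA := pv_foldA l p (pvK l) (fun _ => 0)
      ((l.map (fun char => (char.toNat : Int) - ('a'.toNat : Int) + 1)).sum)
      (pvK_nodup l) hle (fun _ _ => rfl)
    rw [hA]
    dsimp only
    rw [pvMsk_filterMap]
    rw [PySem.Dict.foldl_insert_getD_add_one_eq_counter, PySem.Dict.keys_counter]
    have hB := pv_foldB l p (PySem.List.sorted (PySem.Set.ofList l) (fun x => x) true)
      PySem.Dict.empty (fun _ => 0)
      ((l.map (fun c => (c.toNat : Int) - ('a'.toNat : Int) + 1)).sum)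
      (pvK_nodup l) (fun c => PySem.Dict.getD_empty c 0) (fun _ _ => rfl)
    rw [pv_outB l [] _ _ hB.1]
    rw [List.nil_append]
    rfl


-- ===== VERDICT (by name: the statement is the Claim_ definition above) =====
theorem process_case_spec : Claim_equal_process_case := by
  intro w p _
  exact pv_main w p
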